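-- pv_equiv track=rewrite | github.com/davidleora/sokoban-ai-solver | test-code/test_post_processing.py | post_processing_moves_verbose
-- ===== SOURCE A (Python) =====
-- def post_processing_moves_verbose(response):
--     """Extended version that shows which line each move is detected from"""
--     steps = ""
--     detections = []
--     plan = response.strip().split('\n')
--
--     for line_num, step in enumerate(plan, start=1):
--         found = None
--
--         if "<U>" in step or "**U**" in step:
--             steps += "U"
--             found = "U"
--         elif "<D>" in step or "**D**" in step:
--             steps += "D"
--             found = "D"
--         elif "<L>" in step or "**L**" in step:
--             steps += "L"
--             found = "L"
--         elif "<R>" in step or "**R**" in step: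
--             steps += "R"
--             found = "R"
--
--         if found:
--             # Truncate long lines for display
--             display_line = step if len(step) <= 100 else step[:97] + "..."
--             detections.append((line_num, found, display_line))
--
--     return steps, detections
-- ===== SOURCE B (Python) =====
-- def post_processing_moves_verbose(response):
--     plan = response.strip().split('\n')
--     assigned = [None] * len(plan)
--     # direction-major: each letter makes its own pass over the lines and
--     # claims every still-unclaimed line containing one of its markers;
--     # processing letters in priority order U,D,L,R reproduces first-match priority
--     for letter in "UDLR":
--         for i, line in enumerate(plan):
--             if assigned[i] is None and ("<" + letter + ">" in line or "**" + letter + "**" in line):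
--                 assigned[i] = letter
--     steps = "".join(d for d in assigned if d)
--     detections = []
--     for i, (d, line) in enumerate(zip(assigned, plan)):
--         if d:
--             detections.append((i + 1, d, line if len(line) <= 100 else line[:97] + "..."))
--     return steps, detections
-- ===== Notes on version B (the rewrite author's own statement) =====
-- stated objective: alternative
-- what changed: A's single line-major loop with an if/elif marker chain and two mutable accumulators is replaced by a direction-major algorithm: each letter U,D,L,R makes its own pass over all lines claiming still-unclaimed lines into an assignment array, and the two outputs are then assembled from that array in separate final passes.
import Mathlib
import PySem

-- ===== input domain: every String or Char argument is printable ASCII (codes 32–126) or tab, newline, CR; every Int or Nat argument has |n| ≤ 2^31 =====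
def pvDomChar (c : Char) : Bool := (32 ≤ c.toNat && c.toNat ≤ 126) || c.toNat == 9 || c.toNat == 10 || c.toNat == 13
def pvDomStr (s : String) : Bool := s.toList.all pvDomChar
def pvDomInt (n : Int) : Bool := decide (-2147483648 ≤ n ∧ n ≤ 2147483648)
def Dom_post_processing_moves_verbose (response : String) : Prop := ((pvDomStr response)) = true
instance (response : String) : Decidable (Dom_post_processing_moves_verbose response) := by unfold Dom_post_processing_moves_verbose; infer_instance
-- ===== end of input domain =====

-- B replaces A's single line-major loop with an if/elif chain by a direction-major
-- algorithm: each letter U,D,L,R makes its own pass over the lines and claims every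
-- still-unclaimed line containing one of its markers (alternative; same cost).

-- ===== PORT A =====
-- one iteration of A's loop body: branch chain sets (steps, found), then `if found:` appends
def pvStepA (acc : String × List (Int × String × String)) (p : Int × String) :
    String × List (Int × String × String) :=
  let step := p.2
  let sf : String × Option String :=
    if PySem.Str.isIn "<U>" step || PySem.Str.isIn "**U**" step then (acc.1 ++ "U", some "U")
    else if PySem.Str.isIn "<D>" step || PySem.Str.isIn "**D**" step then (acc.1 ++ "D", some "D")
    else if PySem.Str.isIn "<L>" step || PySem.Str.isIn "**L**" step then (acc.1 ++ "L", some "L")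
    else if PySem.Str.isIn "<R>" step || PySem.Str.isIn "**R**" step then (acc.1 ++ "R", some "R")
    else (acc.1, none)
  match sf.2 with
  | some f =>
      let display := if PySem.Str.len step ≤ 100 then step
                     else PySem.Str.slice step none (some 97) ++ "..."
      (sf.1, acc.2 ++ [(p.1, f, display)])
  | none => (sf.1, acc.2)

def post_processing_moves_verbose (response : String) : String × (List (Int × String × String)) :=
  let plan := (PySem.Str.split? (PySem.Str.strip response) "\n").getD []
  (PySem.List.enumerate plan 1).foldl pvStepA ("", [])

-- ===== PORT B =====
-- does `line` contain "<c>" or "**c**"? (markers built from the letter, as in Source B)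
def pvMatches (c : Char) (line : String) : Bool :=
  PySem.Str.isIn ("<" ++ String.ofList [c] ++ ">") line ||
  PySem.Str.isIn ("**" ++ String.ofList [c] ++ "**") line

-- one pass of letter c over the lines: claim every still-unclaimed matching line
def pvPass (plan : List String) (assigned : List (Option String)) (c : Char) : List (Option String) :=
  (assigned.zip plan).map (fun p => if p.1.isNone && pvMatches c p.2 then some (String.ofList [c]) else p.1)

def pvTruncate (s : String) : String :=
  if PySem.Str.len s ≤ 100 then s else PySem.Str.slice s none (some 97) ++ "..."

def post_processing_moves_verbose_alt (response : String) : String × (List (Int × String × String)) :=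
  let plan := (PySem.Str.split? (PySem.Str.strip response) "\n").getD []
  let assigned := ("UDLR".toList).foldl (pvPass plan) (plan.map (fun _ => (none : Option String)))
  let steps := PySem.Str.join "" (assigned.filterMap id)
  let detections := (PySem.List.enumerate (assigned.zip plan) 0).foldl
    (fun acc p => match p.2.1 with
      | some d => acc ++ [(p.1 + 1, d, pvTruncate p.2.2)]
      | none => acc) []
  (steps, detections)

-- ===== PRECONDITION & SPEC =====
def Spec_post_processing_moves_verbose (response : String) (out : String × (List (Int × String × String))) : Prop := out = post_processing_moves_verbose_alt response
instance (response : String) (out : String × (List (Int × String × String))) : Decidable (Spec_post_processing_moves_verbose response out) := by unfold Spec_post_processing_moves_verbose; infer_instance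

-- ===== CLAIM =====
def Claim_equal_post_processing_moves_verbose : Prop := ∀ (response : String), Dom_post_processing_moves_verbose response → Spec_post_processing_moves_verbose response (post_processing_moves_verbose response)

-- ===== LEMMAS AND PROOFS =====
-- first letter of cs whose markers occur in line
def pvFirst : List Char → String → Option String
  | [], _ => none
  | c :: cs, line => if pvMatches c line then some (String.ofList [c]) else pvFirst cs line

theorem pvFirst_chain (l : String) :
    pvFirst "UDLR".toList l =
      if PySem.Str.isIn "<U>" l || PySem.Str.isIn "**U**" l then some "U"
      else if PySem.Str.isIn "<D>" l || PySem.Str.isIn "**D**" l then some "D"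
      else if PySem.Str.isIn "<L>" l || PySem.Str.isIn "**L**" l then some "L"
      else if PySem.Str.isIn "<R>" l || PySem.Str.isIn "**R**" l then some "R"
      else none := rfl

theorem pv_step_eq (acc : String × List (Int × String × String)) (p : Int × String) :
    pvStepA acc p = match pvFirst "UDLR".toList p.2 with
      | some f => (acc.1 ++ f, acc.2 ++ [(p.1, f, pvTruncate p.2)])
      | none => acc := by
  simp only [pvStepA, pvFirst_chain, pvTruncate]
  split_ifs <;> rfl

-- B's passes compute pvFirst at every line
theorem pv_pass_map (plan : List String) (g : String → Option String) (c : Char) :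
    pvPass plan (plan.map g) c =
      plan.map (fun l => if (g l).isNone && pvMatches c l then some (String.ofList [c]) else g l) := by
  induction plan with
  | nil => rfl
  | cons x xs ih =>
    simp only [pvPass, List.map_cons, List.zip_cons_cons] at *
    rw [ih]

theorem pv_fold_pass (cs : List Char) (plan : List String) (g : String → Option String) :
    cs.foldl (pvPass plan) (plan.map g) =
      plan.map (fun l => match g l with
        | some x => some x
        | none => pvFirst cs l) := by
  induction cs generalizing g with
  | nil =>
    simp only [List.foldl_nil, pvFirst]
    apply List.map_congr_left; intro l _; cases g l <;> rfl
  | cons c cs ih =>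
    simp only [List.foldl_cons, pv_pass_map, ih]
    apply List.map_congr_left; intro l _
    cases h : g l with
    | some x => simp
    | none =>
      simp only [Option.isNone_none, Bool.true_and, pvFirst]
      by_cases hm : pvMatches c l <;> simp [hm]

-- the clean common specification of both programs
def pvSpecDet : List String → Int → List (Int × String × String)
  | [], _ => []
  | x :: xs, i =>
      (match pvFirst "UDLR".toList x with
       | some f => [(i, f, pvTruncate x)]
       | none => []) ++ pvSpecDet xs (i + 1)

theorem pv_A_main (plan : List String) (i : Int) (s : String) (d : List (Int × String × String)) :
    (PySem.List.enumerate plan i).foldl pvStepA (s, d) =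
      (s ++ PySem.Str.join "" ((plan.map (pvFirst "UDLR".toList)).filterMap id),
       d ++ pvSpecDet plan i) := by
  induction plan generalizing i s d with
  | nil => simp [PySem.List.enumerate_nil, PySem.Str.join, PySem.Chars.join_nil, pvSpecDet]
  | cons x xs ih =>
    rw [PySem.List.enumerate_cons]
    simp only [List.foldl_cons, pv_step_eq, pvSpecDet, List.map_cons, List.filterMap_cons]
    rcases h : pvFirst "UDLR".toList x with _ | f
    · simpa [h] using ih (i + 1) s d
    · simp only [id]
      rw [ih (i + 1)]
      have hj : ∀ (xs : List String), PySem.Str.join "" (f :: xs) = f ++ PySem.Str.join "" xs := by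
        intro ys
        cases ys with
        | nil => simp [PySem.Str.join, PySem.Chars.join_singleton, PySem.Chars.join_nil]
        | cons y ys => simp [PySem.Str.join, PySem.Chars.join_cons_cons, String.ofList_append]
      simp [hj, String.append_assoc]

theorem pv_B_det (plan : List String) (i : Int) (acc : List (Int × String × String)) :
    (PySem.List.enumerate ((plan.map (pvFirst "UDLR".toList)).zip plan) i).foldl
      (fun acc p => match p.2.1 with
        | some d => acc ++ [(p.1 + 1, d, pvTruncate p.2.2)]
        | none => acc) acc = acc ++ pvSpecDet plan (i + 1) := by
  induction plan generalizing i acc with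
  | nil => simp [PySem.List.enumerate_nil, pvSpecDet]
  | cons x xs ih =>
    simp only [List.map_cons, List.zip_cons_cons, PySem.List.enumerate_cons, List.foldl_cons,
      pvSpecDet]
    rcases h : pvFirst "UDLR".toList x with _ | f
    · simpa [h] using ih (i + 1) acc
    · rw [ih (i + 1)]
      simp

-- ===== VERDICT =====
theorem post_processing_moves_verbose_spec : Claim_equal_post_processing_moves_verbose := by
  intro response _
  unfold Spec_post_processing_moves_verbose post_processing_moves_verbose post_processing_moves_verbose_alt
  dsimp only
  have hassigned := pv_fold_pass "UDLR".toList
    ((PySem.Str.split? (PySem.Str.strip response) "\n").getD []) (fun _ => none)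
  simp only at hassigned
  rw [hassigned, pv_A_main, pv_B_det]
  simp
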